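-- pv_equiv track=rewrite | github.com/ntshcalleia/Listas_AlgGraf_2017_2 | lista3/questao1.py | elevatorFloor
-- ===== SOURCE A (Python) =====
-- def elevatorFloor(real_floor):
--     if real_floor < 4:
--         return real_floor
--
--     prev_floor = 2
--     current_floor = 3
--
--     for i in range(4, real_floor + 1):
--         prev_floor = current_floor
--         current_floor = prev_floor + 1
--         if current_floor % 10 == 4:
--             current_floor = current_floor + 1
--
--     return current_floor
-- ===== SOURCE B (Python) =====
-- def elevatorFloor(real_floor):
--     if real_floor < 4:
--         return real_floor
--     q, r = divmod(real_floor - 4, 9)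
--     return 5 + 10 * q + r
-- ===== Notes on version B (the rewrite author's own statement) =====
-- stated objective: faster
-- what changed: Replaces the floor-by-floor simulation loop with an O(1) closed-form divmod by 9 (each decade keeps 9 displayed floors once those ending in 4 are skipped).
import Mathlib
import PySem

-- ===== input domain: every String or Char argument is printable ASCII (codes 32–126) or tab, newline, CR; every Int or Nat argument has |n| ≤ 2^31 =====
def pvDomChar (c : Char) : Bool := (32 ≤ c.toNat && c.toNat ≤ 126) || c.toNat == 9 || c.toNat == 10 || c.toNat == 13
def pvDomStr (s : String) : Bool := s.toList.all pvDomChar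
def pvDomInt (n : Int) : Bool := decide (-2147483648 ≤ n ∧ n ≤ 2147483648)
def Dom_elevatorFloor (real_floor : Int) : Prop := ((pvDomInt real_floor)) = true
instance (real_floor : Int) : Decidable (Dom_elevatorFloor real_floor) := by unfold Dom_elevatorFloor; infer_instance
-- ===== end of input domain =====

-- B replaces A's O(n) floor-by-floor simulation with an O(1) closed form (divmod by 9,
-- since every decade keeps 9 displayed floors once those ending in 4 are skipped).

-- ===== PORT A =====
-- literal port of A: simulate the elevator display floor by floor from 4 up to real_floor
def elevatorFloor (real_floor : Int) : Int :=
  if real_floor < 4 then real_floor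
  else
    let st := (PySem.List.pyRange 4 (real_floor + 1) 1).foldl
      (fun (s : Int × Int) _ =>
        let prev_floor := s.2
        let current_floor := prev_floor + 1
        let current_floor := if PySem.Int.mod current_floor 10 == 4 then current_floor + 1 else current_floor
        (prev_floor, current_floor)) (2, 3)
    st.2

-- ===== PORT B =====
-- literal port of B: closed form via divmod(real_floor - 4, 9)
def elevatorFloor_alt (real_floor : Int) : Int :=
  if real_floor < 4 then real_floor
  else
    let q := PySem.Int.floordiv (real_floor - 4) 9
    let r := PySem.Int.mod (real_floor - 4) 9
    5 + 10 * q + r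

-- ===== PRECONDITION & SPEC =====
def Spec_elevatorFloor (real_floor : Int) (out : Int) : Prop := out = elevatorFloor_alt real_floor
instance (real_floor : Int) (out : Int) : Decidable (Spec_elevatorFloor real_floor out) := by unfold Spec_elevatorFloor; infer_instance

-- ===== CLAIM (what is proved, stated in full; the proofs are below) =====
def Claim_equal_elevatorFloor : Prop := ∀ (real_floor : Int), Dom_elevatorFloor real_floor → Spec_elevatorFloor real_floor (elevatorFloor real_floor)

-- ===== LEMMAS AND PROOFS =====

-- the pair state's first component is dead: the second component evolves on its own
theorem pv_foldl_pair_snd (f : Int → Int) (l : List Int) (p c : Int) :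
    (l.foldl (fun (s : Int × Int) _ => (s.2, f s.2)) (p, c)).2
      = l.foldl (fun (c : Int) _ => f c) c := by
  induction l generalizing p c with
  | nil => rfl
  | cons x xs ih => simp only [List.foldl_cons]; exact ih c (f c)

-- Python %: for the positive divisor 10 it is plain emod
theorem pv_mod_emod (a : Int) (b : Int) (hb : 0 < b) : PySem.Int.mod a b = a % b :=
  PySem.Int.mod_eq_emod_of_pos hb

-- closed form for the loop: after the iterations over range(4, 4+n) the display floor is n + 4 + (n-1)/9
theorem pv_loop_closed (n : Nat) :
    ((PySem.List.pyRange 4 (4 + (n : Int)) 1).foldl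
        (fun (c : Int) _ =>
          let c' := c + 1
          if PySem.Int.mod c' 10 == 4 then c' + 1 else c') 3)
      = (n : Int) + 4 + ((n : Int) - 1) / 9 := by
  induction n with
  | zero => decide
  | succ m ih =>
    have hr : PySem.List.pyRange 4 (4 + ((m + 1 : Nat) : Int)) 1
        = PySem.List.pyRange 4 (4 + (m : Int)) 1 ++ [4 + (m : Int)] := by
      rw [PySem.List.pyRange_one, PySem.List.pyRange_one]
      have h1 : (4 + ((m + 1 : Nat) : Int) - 4).toNat = m + 1 := by push_cast; omega
      have h2 : (4 + (m : Int) - 4).toNat = m := by omega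
      rw [h1, h2, List.range_succ, List.map_append]
      simp
    rw [hr, List.foldl_append, ih]
    simp only [List.foldl_cons, List.foldl_nil, pv_mod_emod _ 10 (by norm_num), beq_iff_eq]
    push_cast
    split_ifs with h <;> omega

-- ===== VERDICT (by name: the statement is the Claim_ definition above) =====
theorem elevatorFloor_spec : Claim_equal_elevatorFloor := by
  intro r _
  unfold Spec_elevatorFloor elevatorFloor elevatorFloor_alt
  split_ifs with h
  · rfl
  · dsimp only
    have hn : ((r - 3).toNat : Int) = r - 3 := by omega
    have hA := pv_loop_closed (r - 3).toNat
    rw [hn] at hA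
    have h4 : (4 : Int) + (r - 3) = r + 1 := by ring
    rw [h4] at hA
    rw [pv_foldl_pair_snd (fun c => if PySem.Int.mod (c + 1) 10 == 4 then c + 1 + 1 else c + 1)]
    dsimp only at hA
    rw [hA]
    rw [PySem.Int.floordiv_eq_ediv_of_pos (by norm_num : (0:Int) < 9),
        PySem.Int.mod_eq_emod_of_pos (by norm_num : (0:Int) < 9)]
    have := Int.ediv_add_emod (r - 4) 9
    omega
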